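-- pv_equiv track=rewrite | github.com/pypi-data/pypi-mirror-52 | packages/missinglinkai-resource-manager-docker/missinglinkai_resource_manager_docker-19.9.2606-py3-none-any.whl/missinglink/resource_manager/docker/controllers/cloud_logger.py | _guess_log_level
-- ===== SOURCE A (Python) =====
-- def _guess_log_level(line, step_name, given_level=None):
--     if given_level:
--         return given_level, line
--
--     for reserved in ['DEBUG', 'INFO', 'WARNING', 'ERROR', 'FATAL']:
--         target_prefix = f'{reserved}: '.lower()
--         if line.lower().startswith(target_prefix):
--             return reserved, line[len(target_prefix):]
--
--     log_level_guess = 'INFO' if step_name.endswith('run') else 'DEBUG'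
--     return log_level_guess, line
-- ===== SOURCE B (Python) =====
-- _LEVELS = frozenset(('DEBUG', 'INFO', 'WARNING', 'ERROR', 'FATAL'))
--
--
-- def _guess_log_level(line, step_name, given_level=None):
--     if given_level:
--         return given_level, line
--
--     head, sep, rest = line.partition(': ')
--     if sep:
--         level = head.upper()
--         if level in _LEVELS:
--             return level, rest
--
--     return ('INFO' if step_name.endswith('run') else 'DEBUG'), line
-- ===== Notes on version B (the rewrite author's own statement) =====
-- stated objective: simpler
-- what changed: Replaces the loop that probes the line with five case-folded startswith tests by a single partition at the first ': ' followed by one membership test of the upper-cased head in a frozenset of level names.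
import Mathlib
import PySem

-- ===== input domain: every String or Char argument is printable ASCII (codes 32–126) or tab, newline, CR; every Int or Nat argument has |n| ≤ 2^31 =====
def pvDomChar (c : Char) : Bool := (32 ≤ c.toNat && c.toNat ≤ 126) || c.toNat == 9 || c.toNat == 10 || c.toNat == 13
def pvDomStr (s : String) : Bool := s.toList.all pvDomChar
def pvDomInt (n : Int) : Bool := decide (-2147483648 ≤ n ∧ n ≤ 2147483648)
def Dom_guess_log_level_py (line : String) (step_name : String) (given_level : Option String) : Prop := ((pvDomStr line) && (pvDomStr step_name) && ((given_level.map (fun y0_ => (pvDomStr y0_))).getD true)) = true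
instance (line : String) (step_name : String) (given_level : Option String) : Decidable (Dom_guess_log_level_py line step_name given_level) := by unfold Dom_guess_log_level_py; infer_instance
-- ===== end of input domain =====

-- B replaces A's five startswith probes by a single partition at the first ': ' plus one
-- membership test of the upper-cased head (objective: simpler, one parse instead of five scans).

-- ===== PORT A =====
-- A's for-loop with early return, as structural recursion over the reserved list
def pvGuessLoop (line : String) : List String → Option (String × String)
  | [] => none
  | reserved :: rest =>
    let target_prefix := PySem.Str.lower (reserved ++ ": ")
    if PySem.Str.startswith (PySem.Str.lower line) target_prefix then
      some (reserved, PySem.Str.slice line (some (PySem.Str.len target_prefix)) none)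
    else pvGuessLoop line rest

def guess_log_level_py (line : String) (step_name : String) (given_level : Option String) : String × String :=
  -- Python truthiness of Optional[str]: None and '' are falsy
  if given_level.getD "" ≠ "" then (given_level.getD "", line)
  else
    match pvGuessLoop line ["DEBUG", "INFO", "WARNING", "ERROR", "FATAL"] with
    | some out => out
    | none =>
      let log_level_guess := if PySem.Str.endswith step_name "run" then "INFO" else "DEBUG"
      (log_level_guess, line)

-- ===== PORT B =====
-- hand port of str.partition(': ') on code points (PySem has no partition): exact — it splits
-- at the LEFTMOST occurrence of the two-char separator ': ', none = separator absent
def pvPartition : List Char → Option (List Char × List Char)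
  | ':' :: ' ' :: r => some ([], r)
  | c :: r => (pvPartition r).map (fun p => (c :: p.1, p.2))
  | [] => none

def guess_log_level_py_alt (line : String) (step_name : String) (given_level : Option String) : String × String :=
  if given_level.getD "" ≠ "" then (given_level.getD "", line)
  else
    match pvPartition line.toList with
    | some (head, rest) =>
      let level := String.ofList (PySem.Chars.upper head)
      if ["DEBUG", "INFO", "WARNING", "ERROR", "FATAL"].contains level then
        (level, String.ofList rest)
      else ((if PySem.Str.endswith step_name "run" then "INFO" else "DEBUG"), line)
    | none => ((if PySem.Str.endswith step_name "run" then "INFO" else "DEBUG"), line)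

-- ===== PRECONDITION & SPEC =====
def Spec_guess_log_level_py (line : String) (step_name : String) (given_level : Option String) (out : String × String) : Prop := out = guess_log_level_py_alt line step_name given_level
instance (line : String) (step_name : String) (given_level : Option String) (out : String × String) : Decidable (Spec_guess_log_level_py line step_name given_level out) := by unfold Spec_guess_log_level_py; infer_instance

-- ===== CLAIM (what is proved, stated in full; the proofs are below) =====
def Claim_equal_guess_log_level_py : Prop := ∀ (line : String) (step_name : String) (given_level : Option String), Dom_guess_log_level_py line step_name given_level → Spec_guess_log_level_py line step_name given_level (guess_log_level_py line step_name given_level)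

-- ===== LEMMAS AND PROOFS =====

-- basic Char facts about PySem's ASCII case maps
theorem pvCharLe (a c : Char) : (a ≤ c) ↔ (a.toNat ≤ c.toNat) := by
  rw [Char.le_def, UInt32.le_iff_toNat_le]; rfl

theorem pvToNatOf (n : Nat) (hn : n < 55296) : (Char.ofNat n).toNat = n := by
  rw [Char.toNat_ofNat]; rw [if_pos]; omega

theorem pvCharEq (c d : Char) (h : c.toNat = d.toNat) : c = d :=
  Char.ext (UInt32.toNat_inj.mp h)

theorem pvIsupper (d : Char) : PySem.Chars.isupper d = true ↔ (65 ≤ d.toNat ∧ d.toNat ≤ 90) := by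
  simp [PySem.Chars.isupper, pvCharLe]

theorem pvIslower (d : Char) : PySem.Chars.islower d = true ↔ (97 ≤ d.toNat ∧ d.toNat ≤ 122) := by
  simp [PySem.Chars.islower, pvCharLe]

theorem pvLowerUpper (c : Char) : PySem.Chars.lowerChar (PySem.Chars.upperChar c) = PySem.Chars.lowerChar c := by
  simp only [PySem.Chars.lowerChar, PySem.Chars.upperChar]
  by_cases hl : PySem.Chars.islower c = true
  · rw [if_pos hl]
    have hc := (pvIslower c).mp hl
    have h1 : (Char.ofNat (c.toNat - 32)).toNat = c.toNat - 32 := pvToNatOf _ (by omega)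
    rw [if_pos (by rw [pvIsupper]; omega), if_neg (by rw [pvIsupper]; omega)]
    exact pvCharEq _ _ (by rw [pvToNatOf _ (by omega), h1]; omega)
  · rw [if_neg hl]

theorem pvUpperLower (c : Char) : PySem.Chars.upperChar (PySem.Chars.lowerChar c) = PySem.Chars.upperChar c := by
  simp only [PySem.Chars.lowerChar, PySem.Chars.upperChar]
  by_cases hu : PySem.Chars.isupper c = true
  · rw [if_pos hu]
    have hc := (pvIsupper c).mp hu
    have h1 : (Char.ofNat (c.toNat + 32)).toNat = c.toNat + 32 := pvToNatOf _ (by omega)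
    rw [if_pos (by rw [pvIslower]; omega), if_neg (by rw [pvIslower]; omega)]
    exact pvCharEq _ _ (by rw [pvToNatOf _ (by omega), h1]; omega)
  · rw [if_neg hu]

theorem pvLowerEqColon (c : Char) (h : PySem.Chars.lowerChar c = ':') : c = ':' := by
  by_cases hu : PySem.Chars.isupper c = true
  · exfalso
    have hc := (pvIsupper c).mp hu
    simp only [PySem.Chars.lowerChar, if_pos hu] at h
    have := congrArg Char.toNat h
    rw [pvToNatOf _ (by omega)] at this
    have : c.toNat + 32 = 58 := this
    omega
  · simpa [PySem.Chars.lowerChar, hu] using h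

theorem pvLowerEqSpace (c : Char) (h : PySem.Chars.lowerChar c = ' ') : c = ' ' := by
  by_cases hu : PySem.Chars.isupper c = true
  · exfalso
    have hc := (pvIsupper c).mp hu
    simp only [PySem.Chars.lowerChar, if_pos hu] at h
    have := congrArg Char.toNat h
    rw [pvToNatOf _ (by omega)] at this
    have : c.toNat + 32 = 32 := this
    omega
  · simpa [PySem.Chars.lowerChar, hu] using h

-- pvPartition splits exactly at the first ': '
theorem pvPartition_sound : ∀ (l h r : List Char), pvPartition l = some (h, r) → l = h ++ ':' :: ' ' :: r := by
  intro l
  induction l with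
  | nil => intro h r hp; simp [pvPartition] at hp
  | cons c t ih =>
    intro h r hp
    rw [pvPartition.eq_def] at hp
    split at hp
    · rename_i r' heq
      injection heq with h1 h2
      subst h1; subst h2
      simp at hp
      simp [← hp.1, ← hp.2]
    · rename_i c' r' hne heq
      injection heq with h1 h2
      subst h1; subst h2
      cases ht : pvPartition t with
      | none => rw [ht] at hp; simp at hp
      | some p =>
        rw [ht] at hp
        obtain ⟨h0, r0⟩ := p
        simp at hp
        obtain ⟨rfl, rfl⟩ := hp
        simp [ih h0 r0 ht]
    · rename_i heq; simp at heq

theorem pvPartition_complete : ∀ (h r : List Char), (∀ c ∈ h, c ≠ ':') → pvPartition (h ++ ':' :: ' ' :: r) = some (h, r) := by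
  intro h
  induction h with
  | nil => intro r _; rfl
  | cons c t ih =>
    intro r hc
    rw [pvPartition.eq_def]
    split
    · rename_i r' heq
      injection heq with h1 h2
      exact absurd h1 (hc c (by simp))
    · rename_i c' r' hne heq
      injection heq with h1 h2
      subst h1; subst h2
      simp only [List.append_eq]
      rw [ih r (fun d hd => hc d (by simp [hd]))]
      rfl
    · rename_i heq; simp at heq

-- A's prefix test forces the partition (and pins down head and rest)
theorem pvK2 (L : List Char) (hc : ':' ∉ PySem.Chars.lower L) (l : List Char)
    (hs : PySem.Chars.startswith (PySem.Chars.lower l) (PySem.Chars.lower (L ++ [':', ' '])) = true) :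
    pvPartition l = some (l.take L.length, l.drop (L.length + 2)) ∧
    PySem.Chars.upper (l.take L.length) = PySem.Chars.upper (PySem.Chars.lower L) := by
  rw [PySem.Chars.startswith_iff] at hs
  simp only [PySem.Chars.lower, List.map_append] at hs hc ⊢
  obtain ⟨t, ht⟩ := hs
  have hcolsp : ([':', ' '] : List Char).map PySem.Chars.lowerChar = [':', ' '] := by decide
  rw [hcolsp, List.append_assoc] at ht
  obtain ⟨h, y, rfl, hmh, hmy⟩ := (List.map_eq_append_iff).mp ht.symm
  rw [show ([':', ' '] ++ t : List Char) = ':' :: ' ' :: t by rfl, List.map_eq_cons_iff] at hmy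
  obtain ⟨c1, t1, rfl, hc1, hmy2⟩ := hmy
  rw [List.map_eq_cons_iff] at hmy2
  obtain ⟨c2, r, rfl, hc2, hmr⟩ := hmy2
  have hc1' : c1 = ':' := pvLowerEqColon c1 hc1
  have hc2' : c2 = ' ' := pvLowerEqSpace c2 hc2
  subst hc1'; subst hc2'
  have hlen : h.length = L.length := by
    have := congrArg List.length hmh; simpa using this
  have hfree : ∀ c ∈ h, c ≠ ':' := by
    intro c hcmem rfl
    exact hc (by rw [← hmh]; exact List.mem_map_of_mem hcmem)
  have hpart := pvPartition_complete h r hfree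
  constructor
  · rw [List.take_left' hlen]
    have hdrop : ((h ++ [':', ' ']) ++ r).drop (L.length + 2) = r := by
      apply List.drop_left'
      simp [hlen]
    rw [show h ++ ':' :: ' ' :: r = (h ++ [':', ' ']) ++ r by simp] at *
    rw [hdrop]
    simpa using hpart
  · rw [List.take_left' hlen]
    unfold PySem.Chars.upper
    have := congrArg (List.map PySem.Chars.upperChar) hmh
    simpa [Function.comp_def, pvUpperLower] using this

-- a successful partition whose upper-cased head is L makes A's prefix test for L succeed
theorem pvK1 (L l h r : List Char) (hp : pvPartition l = some (h, r))
    (hu : PySem.Chars.upper h = L) :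
    PySem.Chars.startswith (PySem.Chars.lower l) (PySem.Chars.lower (L ++ [':', ' '])) = true ∧
    l.drop (L.length + 2) = r := by
  have hl := pvPartition_sound l h r hp
  subst hl
  have hlen : h.length = L.length := by
    have := congrArg List.length hu; simpa [PySem.Chars.upper] using this
  have hlow : PySem.Chars.lower L = PySem.Chars.lower h := by
    rw [← hu]
    simp [PySem.Chars.lower, PySem.Chars.upper, Function.comp_def, pvLowerUpper]
  constructor
  · rw [PySem.Chars.startswith_iff]
    simp only [PySem.Chars.lower, List.map_append] at hlow ⊢
    refine ⟨List.map PySem.Chars.lowerChar r, ?_⟩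
    rw [show (List.map PySem.Chars.lowerChar [':', ' '] : List Char) = [':', ' '] by decide]
    rw [hlow]
    simp
    decide
  · rw [show h ++ ':' :: ' ' :: r = (h ++ [':', ' ']) ++ r by simp]
    apply List.drop_left'
    simp [hlen]

-- bridge: the loop's String-level condition, read on code points
theorem pvCondIff (L : String) (line : String) :
    PySem.Str.startswith (PySem.Str.lower line) (PySem.Str.lower (L ++ ": ")) =
    PySem.Chars.startswith (PySem.Chars.lower line.toList) (PySem.Chars.lower (L.toList ++ [':', ' '])) := by
  simp [PySem.Str.startswith, String.toList_append]

-- if the line has no ': ' at all, no reserved prefix can match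
theorem pvNoMatch (L : String) (hc : ':' ∉ PySem.Chars.lower L.toList) (line : String)
    (hp : pvPartition line.toList = none) :
    PySem.Str.startswith (PySem.Str.lower line) (PySem.Str.lower (L ++ ": ")) = false := by
  rw [pvCondIff]
  by_contra hne
  rw [Bool.not_eq_false] at hne
  have := (pvK2 L.toList hc line.toList hne).1
  rw [hp] at this
  cases this

-- if the line partitions as (h, r) but upper h ≠ L, the prefix test for L fails
theorem pvNotLevel (L : String) (hc : ':' ∉ PySem.Chars.lower L.toList)
    (hcanon : PySem.Chars.upper (PySem.Chars.lower L.toList) = L.toList)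
    (line : String) (h r : List Char) (hp : pvPartition line.toList = some (h, r))
    (hne : PySem.Chars.upper h ≠ L.toList) :
    PySem.Str.startswith (PySem.Str.lower line) (PySem.Str.lower (L ++ ": ")) = false := by
  rw [pvCondIff]
  by_contra hb
  rw [Bool.not_eq_false] at hb
  obtain ⟨hpart, hupp⟩ := pvK2 L.toList hc line.toList hb
  rw [hp] at hpart
  injection hpart with hpair
  have hh : h = line.toList.take L.toList.length := congrArg Prod.fst hpair
  exact hne (by rw [hh, hupp, hcanon])

-- if the line partitions as (h, r) and upper h = L, A's loop entry for L returns (L, rest)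
theorem pvHit (L : String) (line : String) (h r : List Char)
    (hp : pvPartition line.toList = some (h, r)) (hu : PySem.Chars.upper h = L.toList) :
    PySem.Str.startswith (PySem.Str.lower line) (PySem.Str.lower (L ++ ": ")) = true ∧
    PySem.Str.slice line (some (PySem.Str.len (PySem.Str.lower (L ++ ": ")))) none = String.ofList r := by
  obtain ⟨hs, hd⟩ := pvK1 L.toList line.toList h r hp hu
  refine ⟨by rw [pvCondIff]; exact hs, ?_⟩
  have hlen : PySem.Str.len (PySem.Str.lower (L ++ ": ")) = ((L.toList.length + 2 : Nat) : Int) := by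
    simp [PySem.Str.len, PySem.Str.lower, PySem.Chars.lower, String.toList_append]
  rw [hlen]
  simp only [PySem.Str.slice, PySem.Chars.slice_eq_listSlice, PySem.List.slice_from_natCast]
  rw [hd]

-- the core equality, with given_level falsy
theorem pvCore (line step_name : String) :
    (match pvGuessLoop line ["DEBUG", "INFO", "WARNING", "ERROR", "FATAL"] with
     | some out => out
     | none => ((if PySem.Str.endswith step_name "run" then "INFO" else "DEBUG"), line))
    = (match pvPartition line.toList with
       | some (head, rest) =>
         if ["DEBUG", "INFO", "WARNING", "ERROR", "FATAL"].contains (String.ofList (PySem.Chars.upper head)) then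
           (String.ofList (PySem.Chars.upper head), String.ofList rest)
         else ((if PySem.Str.endswith step_name "run" then "INFO" else "DEBUG"), line)
       | none => ((if PySem.Str.endswith step_name "run" then "INFO" else "DEBUG"), line)) := by
  cases hp : pvPartition line.toList with
  | none =>
    have hloop : pvGuessLoop line ["DEBUG", "INFO", "WARNING", "ERROR", "FATAL"] = none := by
      simp only [pvGuessLoop]
      rw [pvNoMatch "DEBUG" (by decide) line hp, pvNoMatch "INFO" (by decide) line hp,
        pvNoMatch "WARNING" (by decide) line hp, pvNoMatch "ERROR" (by decide) line hp,
        pvNoMatch "FATAL" (by decide) line hp]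
      simp
    rw [hloop]
  | some p =>
    obtain ⟨h, r⟩ := p
    dsimp only
    by_cases hin : (["DEBUG", "INFO", "WARNING", "ERROR", "FATAL"] : List String).contains (String.ofList (PySem.Chars.upper h)) = true
    · have hin' : String.ofList (PySem.Chars.upper h) = "DEBUG" ∨ String.ofList (PySem.Chars.upper h) = "INFO" ∨
          String.ofList (PySem.Chars.upper h) = "WARNING" ∨ String.ofList (PySem.Chars.upper h) = "ERROR" ∨
          String.ofList (PySem.Chars.upper h) = "FATAL" := by
        simpa using hin
    -- turn each disjunct into a List Char fact and evaluate the loop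
      have toL : ∀ (S : String), String.ofList (PySem.Chars.upper h) = S → PySem.Chars.upper h = S.toList := by
        intro S hS
        have := congrArg String.toList hS
        simpa using this
      rw [hin, if_pos rfl]
      rcases hin' with hS | hS | hS | hS | hS <;>
        (have hu := toL _ hS
         obtain ⟨hcond, hslice⟩ := pvHit _ line h r hp hu) <;>
        simp only [pvGuessLoop] <;>
        rw [hS]
      · rw [hcond]
        simp
        simpa [PySem.Str.len, PySem.Str.lower, String.toList_append] using hslice
      · rw [pvNotLevel "DEBUG" (by decide) (by decide) line h r hp (by rw [hu]; decide), hcond]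
        simp
        simpa [PySem.Str.len, PySem.Str.lower, String.toList_append] using hslice
      · rw [pvNotLevel "DEBUG" (by decide) (by decide) line h r hp (by rw [hu]; decide),
          pvNotLevel "INFO" (by decide) (by decide) line h r hp (by rw [hu]; decide), hcond]
        simp
        simpa [PySem.Str.len, PySem.Str.lower, String.toList_append] using hslice
      · rw [pvNotLevel "DEBUG" (by decide) (by decide) line h r hp (by rw [hu]; decide),
          pvNotLevel "INFO" (by decide) (by decide) line h r hp (by rw [hu]; decide),
          pvNotLevel "WARNING" (by decide) (by decide) line h r hp (by rw [hu]; decide), hcond]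
        simp
        simpa [PySem.Str.len, PySem.Str.lower, String.toList_append] using hslice
      · rw [pvNotLevel "DEBUG" (by decide) (by decide) line h r hp (by rw [hu]; decide),
          pvNotLevel "INFO" (by decide) (by decide) line h r hp (by rw [hu]; decide),
          pvNotLevel "WARNING" (by decide) (by decide) line h r hp (by rw [hu]; decide),
          pvNotLevel "ERROR" (by decide) (by decide) line h r hp (by rw [hu]; decide), hcond]
        simp
        simpa [PySem.Str.len, PySem.Str.lower, String.toList_append] using hslice
    · have hnotin : ∀ (S : String), S ∈ (["DEBUG", "INFO", "WARNING", "ERROR", "FATAL"] : List String) →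
          PySem.Chars.upper h ≠ S.toList := by
        intro S hmem he
        apply hin
        have : String.ofList (PySem.Chars.upper h) = S := by rw [he]; simp
        simp [this, hmem]
      have hloop : pvGuessLoop line ["DEBUG", "INFO", "WARNING", "ERROR", "FATAL"] = none := by
        simp only [pvGuessLoop]
        rw [pvNotLevel "DEBUG" (by decide) (by decide) line h r hp (hnotin _ (by decide)),
          pvNotLevel "INFO" (by decide) (by decide) line h r hp (hnotin _ (by decide)),
          pvNotLevel "WARNING" (by decide) (by decide) line h r hp (hnotin _ (by decide)),
          pvNotLevel "ERROR" (by decide) (by decide) line h r hp (hnotin _ (by decide)),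
          pvNotLevel "FATAL" (by decide) (by decide) line h r hp (hnotin _ (by decide))]
        simp
      rw [hloop]
      simp only [Bool.not_eq_true] at hin
      rw [hin]
      simp

-- ===== VERDICT (by name: the statement is the Claim_ definition above) =====
theorem guess_log_level_py_spec : Claim_equal_guess_log_level_py := by
  intro line step_name given_level _
  unfold Spec_guess_log_level_py guess_log_level_py guess_log_level_py_alt
  by_cases hg : given_level.getD "" ≠ ""
  · rw [if_pos hg, if_pos hg]
  · rw [if_neg hg, if_neg hg]
    exact pvCore line step_name
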